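-- pv_equiv track=rewrite | github.com/pypi-data/pypi-mirror-392 | packages/Fix-agent/fix_agent-1.0.1-py3-none-any.whl/src/tools/defect_aggregator.py | _analyze_root_cause
-- ===== SOURCE A (Python) =====
-- from typing import Any, Dict, List, Optional, Tuple
--
-- def _analyze_root_cause(defects: List[Dict[str, Any]]) -> str:
--     """分析缺陷的根本原因"""
--     # 使用简单的规则来识别常见模式
--     messages = [d.get("message", "").lower() for d in defects]
--     categories = [d.get("category", "") for d in defects]
--
--     # 检查常见根原因模式
--     if any("undef" in msg or "name '" in msg for msg in messages):
--         return "变量或函数未定义"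
--     elif any("import" in msg or "module" in msg for msg in messages):
--         return "导入或模块问题"
--     elif any("type" in msg or "typing" in msg for msg in messages):
--         return "类型相关错误"
--     elif any("unused" in msg for msg in messages):
--         return "未使用的代码"
--     elif any("format" in msg or "style" in msg for msg in messages):
--         return "代码格式和风格问题"
--     elif any("security" in cat for cat in categories):
--         return "安全相关问题"
--     elif any("performance" in cat for cat in categories):
--         return "性能相关问题"
--     else:
--         return "代码质量问题"
-- ===== SOURCE B (Python) =====
-- def _analyze_root_cause(defects):
--     """分析缺陷的根本原因"""
--     # One pass: gather boolean signals, then decide via the priority chain.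
--     has_undef = has_import = has_type = has_unused = False
--     has_format = has_security = has_performance = False
--     for d in defects:
--         msg = d.get("message", "").lower()
--         cat = d.get("category", "")
--         has_undef = has_undef or "undef" in msg or "name '" in msg
--         has_import = has_import or "import" in msg or "module" in msg
--         has_type = has_type or "type" in msg or "typing" in msg
--         has_unused = has_unused or "unused" in msg
--         has_format = has_format or "format" in msg or "style" in msg
--         has_security = has_security or "security" in cat
--         has_performance = has_performance or "performance" in cat
--     if has_undef:
--         return "变量或函数未定义"
--     if has_import:
--         return "导入或模块问题"
--     if has_type:
--         return "类型相关错误"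
--     if has_unused:
--         return "未使用的代码"
--     if has_format:
--         return "代码格式和风格问题"
--     if has_security:
--         return "安全相关问题"
--     if has_performance:
--         return "性能相关问题"
--     return "代码质量问题"
-- ===== Notes on version B (the rewrite author's own statement) =====
-- stated objective: alternative
-- what changed: Replaces the two list comprehensions plus seven separate any() scans with a single loop over defects that accumulates seven boolean flags, followed by the same priority chain over the flags.
import Mathlib
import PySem

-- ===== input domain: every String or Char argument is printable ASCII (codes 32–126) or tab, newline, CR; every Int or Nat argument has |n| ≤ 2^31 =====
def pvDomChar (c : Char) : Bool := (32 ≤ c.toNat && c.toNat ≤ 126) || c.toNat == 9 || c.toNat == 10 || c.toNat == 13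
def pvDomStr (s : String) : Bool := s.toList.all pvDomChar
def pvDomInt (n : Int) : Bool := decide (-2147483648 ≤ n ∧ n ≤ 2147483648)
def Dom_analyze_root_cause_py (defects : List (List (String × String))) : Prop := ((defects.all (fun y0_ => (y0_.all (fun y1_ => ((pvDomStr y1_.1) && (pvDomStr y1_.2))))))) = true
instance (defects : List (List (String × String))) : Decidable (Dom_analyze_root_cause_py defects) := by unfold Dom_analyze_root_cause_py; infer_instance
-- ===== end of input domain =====

-- B replaces A's seven separate any() scans with one pass building seven boolean flags,
-- then the same priority chain (objective: alternative decomposition, same cost).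

-- ===== PORT A =====
def analyze_root_cause_py (defects : List (List (String × String))) : String :=
  let messages := defects.map (fun d => PySem.Str.lower ((PySem.Dict.mk d).getD "message" ""))
  let categories := defects.map (fun d => (PySem.Dict.mk d).getD "category" "")
  if messages.any (fun msg => PySem.Str.isIn "undef" msg || PySem.Str.isIn "name '" msg) then
    "变量或函数未定义"
  else if messages.any (fun msg => PySem.Str.isIn "import" msg || PySem.Str.isIn "module" msg) then
    "导入或模块问题"
  else if messages.any (fun msg => PySem.Str.isIn "type" msg || PySem.Str.isIn "typing" msg) then
    "类型相关错误"
  else if messages.any (fun msg => PySem.Str.isIn "unused" msg) then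
    "未使用的代码"
  else if messages.any (fun msg => PySem.Str.isIn "format" msg || PySem.Str.isIn "style" msg) then
    "代码格式和风格问题"
  else if categories.any (fun cat => PySem.Str.isIn "security" cat) then
    "安全相关问题"
  else if categories.any (fun cat => PySem.Str.isIn "performance" cat) then
    "性能相关问题"
  else
    "代码质量问题"

-- ===== PORT B =====
structure RcFlags where
  undef : Bool
  imp : Bool
  ty : Bool
  unused : Bool
  fmt : Bool
  sec : Bool
  perf : Bool
deriving Repr, DecidableEq

def rcStep (f : RcFlags) (d : List (String × String)) : RcFlags :=
  let msg := PySem.Str.lower ((PySem.Dict.mk d).getD "message" "")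
  let cat := (PySem.Dict.mk d).getD "category" ""
  { undef := f.undef || PySem.Str.isIn "undef" msg || PySem.Str.isIn "name '" msg
    imp := f.imp || PySem.Str.isIn "import" msg || PySem.Str.isIn "module" msg
    ty := f.ty || PySem.Str.isIn "type" msg || PySem.Str.isIn "typing" msg
    unused := f.unused || PySem.Str.isIn "unused" msg
    fmt := f.fmt || PySem.Str.isIn "format" msg || PySem.Str.isIn "style" msg
    sec := f.sec || PySem.Str.isIn "security" cat
    perf := f.perf || PySem.Str.isIn "performance" cat }

def analyze_root_cause_py_alt (defects : List (List (String × String))) : String :=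
  let f := defects.foldl rcStep ⟨false, false, false, false, false, false, false⟩
  if f.undef then "变量或函数未定义"
  else if f.imp then "导入或模块问题"
  else if f.ty then "类型相关错误"
  else if f.unused then "未使用的代码"
  else if f.fmt then "代码格式和风格问题"
  else if f.sec then "安全相关问题"
  else if f.perf then "性能相关问题"
  else "代码质量问题"

-- ===== PRECONDITION & SPEC =====
def Spec_analyze_root_cause_py (defects : List (List (String × String))) (out : String) : Prop := out = analyze_root_cause_py_alt defects
instance (defects : List (List (String × String))) (out : String) : Decidable (Spec_analyze_root_cause_py defects out) := by unfold Spec_analyze_root_cause_py; infer_instance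

-- ===== CLAIM (what is proved, stated in full; the proofs are below) =====
def Claim_equal_analyze_root_cause_py : Prop := ∀ (defects : List (List (String × String))), Dom_analyze_root_cause_py defects → Spec_analyze_root_cause_py defects (analyze_root_cause_py defects)

-- ===== LEMMAS AND PROOFS =====

def rcMsg (d : List (String × String)) : String :=
  PySem.Str.lower ((PySem.Dict.mk d).getD "message" "")

def rcCat (d : List (String × String)) : String :=
  (PySem.Dict.mk d).getD "category" ""

/-- The fold computes, componentwise, `init.x || any over the list`. -/
theorem rcFold_eq (defects : List (List (String × String))) (f : RcFlags) :
    defects.foldl rcStep f =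
      ⟨f.undef || defects.any (fun d => PySem.Str.isIn "undef" (rcMsg d) || PySem.Str.isIn "name '" (rcMsg d)),
       f.imp || defects.any (fun d => PySem.Str.isIn "import" (rcMsg d) || PySem.Str.isIn "module" (rcMsg d)),
       f.ty || defects.any (fun d => PySem.Str.isIn "type" (rcMsg d) || PySem.Str.isIn "typing" (rcMsg d)),
       f.unused || defects.any (fun d => PySem.Str.isIn "unused" (rcMsg d)),
       f.fmt || defects.any (fun d => PySem.Str.isIn "format" (rcMsg d) || PySem.Str.isIn "style" (rcMsg d)),
       f.sec || defects.any (fun d => PySem.Str.isIn "security" (rcCat d)),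
       f.perf || defects.any (fun d => PySem.Str.isIn "performance" (rcCat d))⟩ := by
  induction defects generalizing f with
  | nil => simp
  | cons d ds ih =>
    simp only [List.foldl_cons, List.any_cons, ih]
    simp [rcStep, rcMsg, rcCat, Bool.or_assoc]

-- ===== VERDICT (by name: the statement is the Claim_ definition above) =====
theorem analyze_root_cause_py_spec : Claim_equal_analyze_root_cause_py := by
  intro defects _
  show analyze_root_cause_py defects = analyze_root_cause_py_alt defects
  simp only [analyze_root_cause_py, analyze_root_cause_py_alt, rcFold_eq, List.any_map,
    Function.comp_def, rcMsg, rcCat, Bool.false_or]
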